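-- pv_equiv track=rewrite | github.com/quantegytrading/analyze-market-data | src/common.py | frequency_of_buys_sells
-- ===== SOURCE A (Python) =====
-- def frequency_of_buys_sells(head: object, tail: object, ret_val=None, frequency: object = 1) -> object | list:
--     if ret_val is None:
--         ret_val = []
--     if not tail:
--         ret_val.append(f'{head} ({frequency})')
--         return ret_val
--     if head in tail:
--         frequency += 1
--         head, *tail = tail
--         ret_val = frequency_of_buys_sells(head, tail, ret_val, frequency)
--         return ret_val
--
--     else:
--         ret_val.append(f'{head} ({frequency})')
--         head, *tail = tail
--         ret_val = frequency_of_buys_sells(head, tail, ret_val, 1)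
--         return ret_val
-- ===== SOURCE B (Python) =====
-- def frequency_of_buys_sells(head: object, tail: object, ret_val=None, frequency: object = 1) -> object | list:
--     out = [] if ret_val is None else ret_val
--     items = [head] + list(tail)
--     counts = {}
--     for x in items:
--         counts[x] = counts.get(x, 0) + 1
--     freq = frequency
--     for x in items:
--         counts[x] -= 1
--         if counts[x] > 0:
--             freq += 1
--         else:
--             out.append(f'{x} ({freq})')
--             freq = 1
--     return out
-- ===== Notes on version B (the rewrite author's own statement) =====
-- stated objective: faster
-- what changed: A recursively re-scans the whole remaining tail with 'head in tail' at every step (O(n^2)); B builds a count dictionary once and does a single linear pass, decrementing the count of each element to decide 'appears later' in O(1).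
import Mathlib
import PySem

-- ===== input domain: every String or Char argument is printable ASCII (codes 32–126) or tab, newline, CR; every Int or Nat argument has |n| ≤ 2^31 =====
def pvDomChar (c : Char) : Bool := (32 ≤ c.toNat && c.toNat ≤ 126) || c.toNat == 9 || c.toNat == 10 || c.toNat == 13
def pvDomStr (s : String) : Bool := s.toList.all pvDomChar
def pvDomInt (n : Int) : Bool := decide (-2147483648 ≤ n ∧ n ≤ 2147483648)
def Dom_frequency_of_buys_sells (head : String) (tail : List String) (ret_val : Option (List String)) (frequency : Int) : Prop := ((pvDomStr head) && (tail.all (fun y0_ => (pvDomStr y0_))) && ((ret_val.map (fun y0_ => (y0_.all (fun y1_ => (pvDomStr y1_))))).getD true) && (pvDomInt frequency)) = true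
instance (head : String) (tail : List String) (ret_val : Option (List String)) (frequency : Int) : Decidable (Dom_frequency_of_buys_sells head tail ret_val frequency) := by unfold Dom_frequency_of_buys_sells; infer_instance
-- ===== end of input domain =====

-- B replaces A's O(n^2) recursion (re-scanning the tail with 'head in tail' at every step) by a
-- count dictionary built once and a single linear pass; equivalence is about the return value
-- (both Pythons append to a caller-supplied ret_val list in place).

-- f'{head} ({frequency})'
def pvFmt (s : String) (f : Int) : String := s ++ " (" ++ PySem.Int.toStr f ++ ")"

-- ===== PORT A =====
def pvFobsA (head : String) (tail : List String) (rv : List String) (frequency : Int) : List String :=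
  match tail with
  | [] => rv ++ [pvFmt head frequency]
  | h :: t =>
    if head ∈ h :: t then
      pvFobsA h t rv (frequency + 1)
    else
      pvFobsA h t (rv ++ [pvFmt head frequency]) 1

def frequency_of_buys_sells (head : String) (tail : List String) (ret_val : Option (List String)) (frequency : Int) : List String :=
  pvFobsA head tail (ret_val.getD []) frequency

-- ===== PORT B =====
-- second loop of Source B: decrement the count of x; emit when nothing of x remains later
def pvFobsBScan (counts : PySem.Dict String Int) (items : List String) (freq : Int) (out : List String) : List String :=
  match items with
  | [] => out
  | x :: rest =>
    let c := counts.insert x (counts.getD x 0 - 1)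
    if c.getD x 0 > 0 then
      pvFobsBScan c rest (freq + 1) out
    else
      pvFobsBScan c rest 1 (out ++ [pvFmt x freq])

def frequency_of_buys_sells_alt (head : String) (tail : List String) (ret_val : Option (List String)) (frequency : Int) : List String :=
  let out := ret_val.getD []
  let items := head :: tail
  let counts := items.foldl (fun d x => d.insert x (d.getD x 0 + 1)) PySem.Dict.empty
  pvFobsBScan counts items frequency out

-- ===== PRECONDITION & SPEC =====
def Spec_frequency_of_buys_sells (head : String) (tail : List String) (ret_val : Option (List String)) (frequency : Int) (out : List String) : Prop := out = frequency_of_buys_sells_alt head tail ret_val frequency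
instance (head : String) (tail : List String) (ret_val : Option (List String)) (frequency : Int) (out : List String) : Decidable (Spec_frequency_of_buys_sells head tail ret_val frequency out) := by unfold Spec_frequency_of_buys_sells; infer_instance

-- ===== CLAIM (what is proved, stated in full; the proofs are below) =====
def Claim_equal_frequency_of_buys_sells : Prop := ∀ (head : String) (tail : List String) (ret_val : Option (List String)) (frequency : Int), Dom_frequency_of_buys_sells head tail ret_val frequency → Spec_frequency_of_buys_sells head tail ret_val frequency (frequency_of_buys_sells head tail ret_val frequency)

-- ===== LEMMAS AND PROOFS =====

-- B's scan pass equals A's recursion whenever counts holds the multiplicities of the unscanned items.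
theorem pvScan_eq (tail : List String) : ∀ (head : String) (counts : PySem.Dict String Int)
    (freq : Int) (out : List String),
    (∀ x, counts.getD x 0 = ((head :: tail).count x : Int)) →
    pvFobsBScan counts (head :: tail) freq out = pvFobsA head tail out freq := by
  induction tail with
  | nil =>
    intro head counts freq out hinv
    have h1 : counts.getD head 0 = 1 := by
      have := hinv head; simpa using this
    simp [pvFobsBScan, pvFobsA, PySem.Dict.getD_insert_self, h1]
  | cons h t ih =>
    intro head counts freq out hinv
    have hhead : (counts.insert head (counts.getD head 0 - 1)).getD head 0
        = (((h :: t).count head : Int)) := by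
      rw [PySem.Dict.getD_insert_self, hinv head]
      rw [List.count_cons]
      simp
    have hinv' : ∀ x, (counts.insert head (counts.getD head 0 - 1)).getD x 0
        = (((h :: t).count x : Int)) := by
      intro x
      by_cases hx : x = head
      · subst hx; exact hhead
      · rw [PySem.Dict.getD_insert, if_neg hx, hinv x, List.count_cons]
        all_goals simp [hx, show ¬head = x from fun he => hx he.symm]
    by_cases hmem : head ∈ h :: t
    · have hpos : ((h :: t).count head : Int) > 0 := by
        exact_mod_cast List.count_pos_iff.mpr hmem
      rw [pvFobsBScan]
      simp only [hhead, hpos, if_pos]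
      rw [ih h _ _ _ hinv']
      rw [pvFobsA]
      simp [hmem]
    · have hzero : ((h :: t).count head : Int) = 0 := by
        have : (h :: t).count head = 0 := by
          simpa using (List.count_eq_zero.mpr hmem)
        exact_mod_cast this
      rw [pvFobsBScan]
      simp only [hhead, hzero]
      rw [if_neg (by omega)]
      rw [ih h _ _ _ hinv']
      rw [pvFobsA]
      simp [hmem]

-- ===== VERDICT (by name: the statement is the Claim_ definition above) =====
theorem frequency_of_buys_sells_spec : Claim_equal_frequency_of_buys_sells := by
  intro head tail ret_val frequency _
  unfold Spec_frequency_of_buys_sells frequency_of_buys_sells frequency_of_buys_sells_alt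
  show pvFobsA head tail (ret_val.getD []) frequency =
    pvFobsBScan ((head :: tail).foldl (fun d x => d.insert x (d.getD x 0 + 1)) PySem.Dict.empty)
      (head :: tail) frequency (ret_val.getD [])
  rw [PySem.Dict.foldl_insert_getD_add_one_eq_counter]
  rw [pvScan_eq tail head _ frequency (ret_val.getD [])
    (fun x => by rw [PySem.Dict.getD_counter])]
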